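-- pv_equiv track=rewrite | github.com/SuncicaPrgomet/Algorithms-in-Bioinformatics | 2A.py | MotifEnumeration
-- ===== SOURCE A (Python) =====
-- from itertools import product
--
-- def GenerateAllKmers(k):
--     set=k*[['A','T','G','C']]
--     return list(product(*set))
--
-- def FindAllKmers(pattern,k):
--     kmers=[]
--     for i in range(0,len(pattern)-k+1):
--         if pattern[i:(i+k)] not in kmers:
--             kmers.append(pattern[i:(i+k)])
--     return kmers
--
-- def HammingDistance(p,q):
--     ham_dist=0
--     for i in range(len(p)):
--         if p[i]!=q[i]:
--             ham_dist+=1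
--     return ham_dist
--
-- def DNeighbourhood(pattern,d):
--     neighbours=[]
--     for kmer in GenerateAllKmers(len(pattern)):
--         kmer=''.join(kmer)
--         if HammingDistance(kmer,pattern)<=d and kmer not in neighbours:
--             neighbours.append(kmer)
--     return neighbours
--
-- def RemoveDuplicate(patterns):
--     removedduplicates=[]
--     for el in patterns:
--         if el not in removedduplicates:
--             removedduplicates.append(el)
--     return removedduplicates
--
-- def MotifEnumeration(list_dna,k,d):
--     patterns=[]
--     for dna in list_dna:
--         for kmer in FindAllKmers(dna,k):
--             for kmer_neighbour in DNeighbourhood(kmer,d):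
--                 kmer_neighbour=''.join(kmer_neighbour)
--                 counter=0
--                 for dna in list_dna:
--                     for comparison_kmer in FindAllKmers(dna,k):
--                         if HammingDistance(comparison_kmer,kmer_neighbour)<=d:
--                             counter+=1
--                             break
--                 if counter==len(list_dna):
--                     patterns.append(kmer_neighbour)
--         return RemoveDuplicate(patterns)
-- ===== SOURCE B (Python) =====
-- def MotifEnumeration(list_dna, k, d):
--     # Candidate motifs come from a recursive d-neighbourhood (only kmers within
--     # distance d) instead of enumerating all 4^k kmers; per-string kmer sets are
--     # deduplicated once and computed lazily (A rescans every string per candidate).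
--     def ham(p, q):
--         return sum(1 for a, b in zip(p, q) if a != b)
--
--     def neighbors(pattern, budget):
--         if budget < 0:
--             return []
--         if not pattern:
--             return ['']
--         head, rest = pattern[0], pattern[1:]
--         out = []
--         for a in 'ATGC':
--             for tail in neighbors(rest, budget - (1 if a != head else 0)):
--                 out.append(a + tail)
--         return out
--
--     def dedup(items):
--         return list(dict.fromkeys(items))
--
--     def raw_kmers(s):
--         return [s[i:i + k] for i in range(len(s) - k + 1)]
--
--     _cache = {}
--
--     def kmers_of(s):
--         if s not in _cache:
--             _cache[s] = dedup(raw_kmers(s))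
--         return _cache[s]
--
--     candidates = [nb for km in kmers_of(list_dna[0]) for nb in neighbors(km, d)]
--     hits = [nb for nb in candidates
--             if all(any(ham(ck, nb) <= d for ck in kmers_of(s)) for s in list_dna)]
--     return dedup(hits)
-- ===== Notes on version B (the rewrite author's own statement) =====
-- stated objective: alternative
-- what changed: Candidate motifs are generated by a recursive d-neighbourhood that only produces kmers within distance d (branching on each position's budget) instead of enumerating and filtering all 4^k kmers for every kmer of the first string; dedup is a single dict.fromkeys pass instead of quadratic membership-append, and per-string kmer sets are deduplicated once and memoized instead of being recomputed inside the innermost loop.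
-- outside the precondition, e.g. on MotifEnumeration([], 0, 0): A returns None, B raises IndexError
import Mathlib
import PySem

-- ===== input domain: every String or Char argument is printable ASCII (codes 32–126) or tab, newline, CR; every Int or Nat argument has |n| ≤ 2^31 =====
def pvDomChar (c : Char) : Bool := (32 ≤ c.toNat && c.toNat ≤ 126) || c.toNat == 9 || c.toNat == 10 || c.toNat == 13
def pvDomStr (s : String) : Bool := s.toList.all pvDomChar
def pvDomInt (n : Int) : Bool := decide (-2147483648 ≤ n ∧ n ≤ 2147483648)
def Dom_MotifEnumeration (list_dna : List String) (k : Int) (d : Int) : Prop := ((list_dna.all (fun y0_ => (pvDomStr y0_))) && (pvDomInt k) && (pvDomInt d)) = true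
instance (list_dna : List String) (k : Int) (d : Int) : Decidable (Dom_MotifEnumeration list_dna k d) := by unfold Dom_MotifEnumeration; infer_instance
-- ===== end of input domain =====

-- B replaces A's enumerate-all-4^k-kmers-and-filter neighbourhood with a recursive
-- d-neighbourhood that only generates kmers within distance d, and replaces the
-- quadratic membership-append dedups with single dict.fromkeys passes.

-- ===== PORT A =====
-- itertools.product over k copies of ['A','T','G','C'] (leftmost position varies slowest)
def GenerateAllKmersGo : Nat → List (List Char)
  | 0 => [[]]
  | n+1 => (['A','T','G','C']).flatMap (fun a => (GenerateAllKmersGo n).map (fun t => a :: t))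

def GenerateAllKmers (k : Int) : List (List Char) := GenerateAllKmersGo k.toNat

def FindAllKmers (pattern : String) (k : Int) : List String :=
  (PySem.List.pyRange 0 ((pattern.toList.length : Int) - k + 1) 1).foldl
    (fun kmers i =>
      let sub := String.ofList (PySem.List.slice pattern.toList (some i) (some (i + k)))
      if kmers.contains sub then kmers else kmers ++ [sub]) []

-- 'for i in range(len(p)): if p[i]!=q[i]' — exact whenever |p| ≤ |q|; Python raises
-- IndexError when q is shorter, and exactly those calls are excluded by Pre_ below.
def HammingDistanceL (p q : List Char) : Int :=
  (PySem.List.pyRange 0 (p.length : Int) 1).foldl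
    (fun acc i => if PySem.List.pyGet? p i ≠ PySem.List.pyGet? q i then acc + 1 else acc) 0

def HammingDistance (p q : String) : Int := HammingDistanceL p.toList q.toList

def DNeighbourhood (pattern : String) (d : Int) : List String :=
  (GenerateAllKmers (pattern.toList.length : Int)).foldl
    (fun nbs t =>
      let kmer := String.ofList t
      if HammingDistance kmer pattern ≤ d ∧ nbs.contains kmer = false then nbs ++ [kmer]
      else nbs) []

def RemoveDuplicate (patterns : List String) : List String :=
  patterns.foldl (fun acc el => if acc.contains el then acc else acc ++ [el]) []

-- A returns inside the first iteration of its outer loop, so only list_dna[0]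
-- contributes candidate kmers; on [] Python falls off the loop and returns None
-- (no List String value) — excluded by Pre_.
def MotifEnumeration (list_dna : List String) (k : Int) (d : Int) : List String :=
  match list_dna with
  | [] => []
  | dna :: _ =>
    RemoveDuplicate
      ((FindAllKmers dna k).foldl (fun pats km =>
        (DNeighbourhood km d).foldl (fun pats' nb =>
          let counter : Int := list_dna.foldl (fun c dna2 =>
            if (FindAllKmers dna2 k).any (fun ck => HammingDistance ck nb ≤ d) then c + 1
            else c) 0
          if counter = (list_dna.length : Int) then pats' ++ [nb] else pats') pats) [])

-- ===== PORT B =====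
def hamB (p q : List Char) : Int := (((p.zip q).filter (fun ab => ab.1 ≠ ab.2)).length : Int)

def neighborsB (pat : List Char) (budget : Int) : List (List Char) :=
  if budget < 0 then []
  else
    match pat with
    | [] => [[]]
    | c :: rest =>
      (['A','T','G','C']).flatMap (fun a =>
        (neighborsB rest (budget - (if a ≠ c then 1 else 0))).map (fun t => a :: t))

def rawKmersB (s : String) (k : Int) : List String :=
  (PySem.List.pyRange 0 ((s.toList.length : Int) - k + 1) 1).map
    (fun i => String.ofList (PySem.List.slice s.toList (some i) (some (i + k))))

-- on [] Python B raises IndexError at kmers_of(list_dna[0]) — excluded by Pre_.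
-- Source B's kmers_of memoizes dedup(raw_kmers(s)) per string; the cache is pure
-- memoization, so it ports as the function s ↦ dedup (rawKmersB s k).
def MotifEnumeration_alt (list_dna : List String) (k : Int) (d : Int) : List String :=
  match list_dna with
  | [] => []
  | first :: _ =>
    let candidates := (PySem.List.dedup (rawKmersB first k)).flatMap
      (fun km => (neighborsB km.toList d).map String.ofList)
    let hits := candidates.filter (fun nb =>
      list_dna.all (fun s => (PySem.List.dedup (rawKmersB s k)).any
        (fun ck => hamB ck.toList nb.toList ≤ d)))
    PySem.List.dedup hits

-- ===== PRECONDITION & SPEC =====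
-- Pre_ excludes the empty list (A falls off its loop and returns None, not a list) and
-- the negative-k inputs on which Python's negative-stop slicing yields kmers of unequal
-- lengths and A's HammingDistance raises IndexError; it is exactly A's returning domain.
def Pre_MotifEnumeration (list_dna : List String) (k : Int) (d : Int) : Prop :=
  list_dna ≠ [] ∧ (0 ≤ k ∨ d < 0 ∨ ∀ s ∈ list_dna, (s.toList.length : Int) ≤ -k)
instance (list_dna : List String) (k : Int) (d : Int) : Decidable (Pre_MotifEnumeration list_dna k d) := by unfold Pre_MotifEnumeration; infer_instance

def pvWitness_MotifEnumeration : List String × Int × Int := (["ACG", "CGT"], 2, 1)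

def Spec_MotifEnumeration (list_dna : List String) (k : Int) (d : Int) (out : List String) : Prop := out = MotifEnumeration_alt list_dna k d
instance (list_dna : List String) (k : Int) (d : Int) (out : List String) : Decidable (Spec_MotifEnumeration list_dna k d out) := by unfold Spec_MotifEnumeration; infer_instance

-- ===== CLAIM (what is proved, stated in full; the proofs are below) =====
def Claim_equal_MotifEnumeration : Prop := ∀ (list_dna : List String) (k : Int) (d : Int), Dom_MotifEnumeration list_dna k d → Pre_MotifEnumeration list_dna k d → Spec_MotifEnumeration list_dna k d (MotifEnumeration list_dna k d)

-- ===== LEMMAS AND PROOFS =====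

-- A's RemoveDuplicate is first-occurrence dedup, i.e. Python's dict.fromkeys order.
theorem removeDup_eq_dedup (xs : List String) : RemoveDuplicate xs = PySem.List.dedup xs := by
  rw [PySem.List.dedup_eq_ofList, PySem.Set.ofList_eq_foldl]; rfl

-- A's FindAllKmers = dedup of B's raw kmer comprehension.
theorem findAll_eq (s : String) (k : Int) :
    FindAllKmers s k = PySem.List.dedup (rawKmersB s k) := by
  rw [PySem.List.dedup_eq_ofList, PySem.Set.ofList_eq_foldl, rawKmersB, List.foldl_map]; rfl

theorem hamB_cons (a b : Char) (p q : List Char) :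
    hamB (a :: p) (b :: q) = (if a ≠ b then 1 else 0) + hamB p q := by
  simp only [hamB, List.zip_cons_cons, List.filter_cons]
  split_ifs with h1 h2 h3 <;> simp_all <;> omega

theorem hamB_nonneg (p q : List Char) : 0 ≤ hamB p q := Int.natCast_nonneg _

theorem hamAux (p : List Char) : ∀ (q : List Char) (c : Int), p.length = q.length →
    (List.range p.length).foldl (fun acc i => if p[i]? = q[i]? then acc else acc + 1) c = c + hamB p q := by
  induction p with
  | nil => intro q c h; simp [hamB]
  | cons a p ih =>
    intro q c h
    match q with
    | [] => simp at h
    | b :: q =>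
      simp only [List.length_cons] at h
      simp only [List.length_cons, List.range_succ_eq_map, List.foldl_cons, List.foldl_map,
        List.getElem?_cons_succ, List.getElem?_cons_zero]
      refine (ih q _ (by omega)).trans ?_
      rw [hamB_cons]
      split_ifs with h1 h2 h3 <;> simp_all <;> omega

theorem hamL_eq_hamB (p q : List Char) (h : p.length = q.length) :
    HammingDistanceL p q = hamB p q := by
  rw [HammingDistanceL, PySem.List.pyRange_zero_nat, List.foldl_map]
  simp only [PySem.List.pyGet?_natCast, ne_eq, ite_not]
  rw [hamAux p q 0 h, zero_add]

theorem len_of_mem_neighborsB (pat : List Char) : ∀ (b : Int) (w : List Char),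
    w ∈ neighborsB pat b → w.length = pat.length := by
  induction pat with
  | nil => intro b w hw; rw [neighborsB] at hw; split at hw <;> simp_all
  | cons c rest ih =>
    intro b w hw; rw [neighborsB] at hw
    split at hw
    · simp_all
    · simp only [List.mem_flatMap, List.mem_map] at hw
      obtain ⟨a, -, t, ht, rfl⟩ := hw
      simp [ih _ t ht]

theorem nonneg_of_neighborsB_ne_nil (pat : List Char) (b : Int) (w : List Char)
    (hw : w ∈ neighborsB pat b) : 0 ≤ b := by
  rw [neighborsB.eq_def] at hw; split at hw
  · simp at hw
  · omega

theorem len_of_mem_prod (n : Nat) : ∀ t ∈ GenerateAllKmersGo n, t.length = n := by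
  induction n with
  | zero => simp [GenerateAllKmersGo]
  | succ n ih =>
    intro t ht
    simp only [GenerateAllKmersGo, List.mem_flatMap, List.mem_map] at ht
    obtain ⟨a, -, u, hu, rfl⟩ := ht
    simp [ih u hu]

theorem nodup_prod (n : Nat) : (GenerateAllKmersGo n).Nodup := by
  induction n with
  | zero => simp [GenerateAllKmersGo]
  | succ n ih =>
    rw [GenerateAllKmersGo, List.nodup_flatMap]
    constructor
    · intro a _; exact ih.map (fun x y h => by simpa using h)
    · have disj : ∀ a b : Char, a ≠ b →
          List.Disjoint ((GenerateAllKmersGo n).map (fun t => a :: t))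
            ((GenerateAllKmersGo n).map (fun t => b :: t)) := by
        intro a b hab x hx hy
        simp only [List.mem_map] at hx hy
        obtain ⟨t, -, rfl⟩ := hx
        obtain ⟨u, -, h⟩ := hy
        simp_all
      simp only [List.pairwise_cons, Function.onFun, List.forall_mem_cons, List.forall_mem_nil,
        and_true, List.Pairwise.nil]
      exact ⟨⟨disj _ _ (by decide), disj _ _ (by decide), disj _ _ (by decide), by simp⟩,
        ⟨disj _ _ (by decide), disj _ _ (by decide), by simp⟩,
        ⟨disj _ _ (by decide), by simp⟩, by simp⟩

theorem len_of_mem_rawKmers (s : String) (k : Int)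
    (H : 0 ≤ k ∨ (s.toList.length : Int) ≤ -k) (ck : String) (hck : ck ∈ rawKmersB s k) :
    ck.toList.length = k.toNat := by
  simp only [rawKmersB, List.mem_map, PySem.List.mem_pyRange_one] at hck
  obtain ⟨i, ⟨hi0, hi1⟩, rfl⟩ := hck
  rw [String.toList_ofList, PySem.List.length_slice]
  simp only [PySem.List.clampIdx]
  split_ifs <;> omega

theorem filter_prod_eq_neighborsB (pat : List Char) : ∀ d : Int,
    (GenerateAllKmersGo pat.length).filter (fun t => decide (hamB t pat ≤ d)) = neighborsB pat d := by
  induction pat with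
  | nil =>
    intro d
    rw [neighborsB.eq_def]
    by_cases h : d < 0 <;> simp only [List.length_nil, GenerateAllKmersGo, if_pos, if_neg, h,
      if_true, if_false, reduceIte] <;> simp [hamB] <;> omega
  | cons c rest ih =>
    intro d
    rw [neighborsB.eq_def]
    simp only [List.length_cons, GenerateAllKmersGo]
    by_cases h : d < 0
    · rw [if_pos h]
      refine List.filter_eq_nil_iff.mpr ?_
      intro t ht
      have := hamB_nonneg t (c :: rest)
      simp only [decide_eq_true_eq]; omega
    · rw [if_neg h]
      have blk : ∀ a : Char,
          List.filter (fun t => decide (hamB t (c :: rest) ≤ d))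
              ((GenerateAllKmersGo rest.length).map (fun t => a :: t))
            = (neighborsB rest (d - (if a ≠ c then 1 else 0))).map (fun t => a :: t) := by
        intro a
        rw [List.filter_map,
          show ((fun t => decide (hamB t (c :: rest) ≤ d)) ∘ (fun t => a :: t))
              = (fun t => decide (hamB t rest ≤ d - (if a ≠ c then 1 else 0))) from
            funext fun t => by
              simp only [Function.comp_apply, hamB_cons]
              exact decide_eq_decide.mpr (by split_ifs <;> omega),
          ih]
      simp only [List.flatMap_cons, List.flatMap_nil, List.filter_append, List.append_nil, blk]

theorem ofList_injective : Function.Injective String.ofList := by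
  intro a b h
  have := congrArg String.toList h
  simpa using this

theorem foldl_dedupfilter (P : String → Prop) [DecidablePred P] (xs : List String) :
    ∀ acc : List String, xs.Nodup → (∀ x ∈ xs, x ∉ acc) →
    xs.foldl (fun nbs x => if P x ∧ nbs.contains x = false then nbs ++ [x] else nbs) acc
      = acc ++ xs.filter (fun x => decide (P x)) := by
  induction xs with
  | nil => simp
  | cons x xs ih =>
    intro acc hnd hdis
    simp only [List.foldl_cons, List.filter_cons]
    by_cases hp : P x
    · have hcx : acc.contains x = false := by
        simpa using hdis x (by simp)
      rw [if_pos ⟨hp, hcx⟩,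
        ih (acc ++ [x]) (List.nodup_cons.mp hnd).2 (fun y hy => by
          simp only [List.mem_append, List.mem_singleton]
          rintro (hmem | rfl)
          · exact hdis y (by simp [hy]) hmem
          · exact (List.nodup_cons.mp hnd).1 hy)]
      simp [hp, List.append_assoc]
    · rw [if_neg (by simp [hp]),
        ih acc (List.nodup_cons.mp hnd).2 (fun y hy => hdis y (by simp [hy]))]
      simp [hp]

theorem dneighbourhood_eq (km : String) (d : Int) :
    DNeighbourhood km d = (neighborsB km.toList d).map String.ofList := by
  have hfm := List.foldl_map (f := fun t : List Char => String.ofList t)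
    (g := fun (nbs : List String) (s : String) =>
      if HammingDistance s km ≤ d ∧ nbs.contains s = false then nbs ++ [s] else nbs)
    (l := GenerateAllKmersGo km.toList.length) (init := ([] : List String))
  have h1 : DNeighbourhood km d
      = ((GenerateAllKmersGo km.toList.length).map (fun t : List Char => String.ofList t)).foldl
        (fun nbs s => if HammingDistance s km ≤ d ∧ nbs.contains s = false then nbs ++ [s]
          else nbs) [] := by
    rw [DNeighbourhood, GenerateAllKmers, Int.toNat_natCast, hfm]
  rw [h1, foldl_dedupfilter (fun s => HammingDistance s km ≤ d) _ []
    ((nodup_prod km.toList.length).map ofList_injective) (by simp)]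
  rw [List.nil_append, List.filter_map]
  rw [List.filter_congr (q := fun t => decide (hamB t km.toList ≤ d)) (fun t ht => by
    simp only [Function.comp_apply, HammingDistance, String.toList_ofList]
    exact decide_eq_decide.mpr (by
      rw [hamL_eq_hamB t km.toList (len_of_mem_prod km.toList.length t ht)]))]
  rw [filter_prod_eq_neighborsB]

theorem filter_flatMap_exchange (g : String → List String) (p : String → Bool) (ks : List String) :
    (ks.flatMap g).filter p = ks.flatMap (fun km => (g km).filter p) := by
  induction ks with
  | nil => simp
  | cons km ks ih => simp [List.flatMap_cons, List.filter_append, ih]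

theorem foldl2_filter (g : String → List String) (C : String → Prop) [DecidablePred C]
    (ks : List String) (acc : List String) :
    ks.foldl (fun pats km => (g km).foldl (fun p nb => if C nb then p ++ [nb] else p) pats) acc
      = acc ++ (ks.flatMap g).filter (fun nb => decide (C nb)) := by
  simp only [PySem.List.foldl_append_ite_eq_filter]
  rw [PySem.List.foldl_append_eq_flatMap, filter_flatMap_exchange]

theorem motif_eq (dna : String) (rest : List String) (k d : Int)
    (hdisj : 0 ≤ k ∨ d < 0 ∨ ∀ s ∈ dna :: rest, (s.toList.length : Int) ≤ -k) :
    MotifEnumeration (dna :: rest) k d = MotifEnumeration_alt (dna :: rest) k d := by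
  have hA : MotifEnumeration (dna :: rest) k d
      = RemoveDuplicate
        ((FindAllKmers dna k).foldl (fun pats km =>
          (DNeighbourhood km d).foldl (fun pats' nb =>
            if ((dna :: rest).foldl (fun c dna2 =>
                  if (FindAllKmers dna2 k).any (fun ck => HammingDistance ck nb ≤ d) then c + 1
                  else c) 0 = ((dna :: rest).length : Int))
            then pats' ++ [nb] else pats') pats) []) := rfl
  rw [hA, foldl2_filter, List.nil_append, removeDup_eq_dedup, findAll_eq]
  have hB : MotifEnumeration_alt (dna :: rest) k d
      = PySem.List.dedup
        (((PySem.List.dedup (rawKmersB dna k)).flatMap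
            (fun km => (neighborsB km.toList d).map String.ofList)).filter
          (fun nb => (dna :: rest).all
            (fun s => (PySem.List.dedup (rawKmersB s k)).any
              (fun ck => decide (hamB ck.toList nb.toList ≤ d))))) := rfl
  rw [hB]
  congr 1
  rw [show (fun km => DNeighbourhood km d)
        = (fun km => (neighborsB km.toList d).map String.ofList) from
      funext fun km => dneighbourhood_eq km d]
  refine List.filter_congr ?_
  intro nb hnb
  simp only [List.mem_flatMap, List.mem_map] at hnb
  obtain ⟨km, hkm, w, hw, rfl⟩ := hnb
  have hd0 : (0 : Int) ≤ d := nonneg_of_neighborsB_ne_nil km.toList d w hw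
  have Hs : ∀ s ∈ dna :: rest, 0 ≤ k ∨ (s.toList.length : Int) ≤ -k := by
    intro s hs
    rcases hdisj with h | h | h
    · exact .inl h
    · omega
    · exact .inr (h s hs)
  have hkm' : km ∈ rawKmersB dna k := by
    rw [PySem.List.dedup_eq_ofList] at hkm
    exact (PySem.Set.mem_ofList _ _).mp hkm
  have hlw : (String.ofList w).toList.length = k.toNat := by
    rw [String.toList_ofList, len_of_mem_neighborsB km.toList d w hw,
      len_of_mem_rawKmers dna k (Hs dna (by simp)) km hkm']
  have hham : ∀ s ∈ dna :: rest, ∀ ck ∈ rawKmersB s k,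
      HammingDistance ck (String.ofList w) = hamB ck.toList (String.ofList w).toList := by
    intro s hs ck hck
    rw [HammingDistance]
    exact hamL_eq_hamB _ _ (by rw [len_of_mem_rawKmers s k (Hs s hs) ck hck, hlw])
  have hper : ∀ s ∈ dna :: rest,
      ((FindAllKmers s k).any (fun ck => decide (HammingDistance ck (String.ofList w) ≤ d)))
        = ((PySem.List.dedup (rawKmersB s k)).any
            (fun ck => decide (hamB ck.toList (String.ofList w).toList ≤ d))) := by
    intro s hs
    rw [findAll_eq, PySem.List.dedup_eq_ofList, Bool.eq_iff_iff]
    simp only [List.any_eq_true, decide_eq_true_eq]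
    constructor
    · rintro ⟨ck, hck, hle⟩
      exact ⟨ck, hck, by
        rw [← hham s hs ck ((PySem.Set.mem_ofList _ _).mp hck)]; exact hle⟩
    · rintro ⟨ck, hck, hle⟩
      exact ⟨ck, hck, by
        rw [hham s hs ck ((PySem.Set.mem_ofList _ _).mp hck)]; exact hle⟩
  rw [PySem.List.foldl_count_if, zero_add, Bool.eq_iff_iff]
  simp only [decide_eq_true_eq, List.all_eq_true, Nat.cast_inj]
  rw [List.countP_eq_length]
  constructor
  · intro h s hs
    rw [← hper s hs]
    exact h s hs
  · intro h s hs
    rw [hper s hs]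
    exact h s hs

-- ===== VERDICT (by name: the statement is the Claim_ definition above) =====
theorem MotifEnumeration_spec : Claim_equal_MotifEnumeration := by
  intro list_dna k d _ hpre
  obtain ⟨hne, hdisj⟩ := hpre
  cases list_dna with
  | nil => exact absurd rfl hne
  | cons dna rest => exact motif_eq dna rest k d hdisj
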